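-- pv_equiv track=rewrite | github.com/kazuki-hara/config-lens | src/utils.py | calculate_hierarchical_path
-- ===== SOURCE A (Python) =====
-- def calculate_hierarchical_path(config: list[str]) -> list[list[str]]:
--     """階層構造を持つコンフィグの階層パスを計算する。
--
--     各行のインデント深さを元に親子関係を再構築し、
--     各行がどの親ブロック下に属するかをパスリストで返す。
--
--     Args:
--         config: コンフィグの行リスト。インデントで階層を表現する。
--
--     Returns:
--         各行に対応する階層パスのリスト。
--         パスは祖先から自行までのストリップ済み行テキストのリスト。
--
--     Example:
--         >>> lines = ["interface Gi0/0", " no shutdown"]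
--         >>> calculate_hierarchical_path(lines)
--         [['interface Gi0/0'], ['interface Gi0/0', 'no shutdown']]
--     """
--     hierarchical_paths: list[list[str]] = []
--     current_path: list[tuple[int, str]] = []
--     for line in config:
--         indent = len(line) - len(line.lstrip())
--         # インデントが同じか浅くなった場合、スタックから余分な要素を除去する
--         while current_path and current_path[-1][0] >= indent:
--             current_path.pop()
--         # 現在行を (インデント幅, ストリップ済みテキスト) でスタックに積む
--         current_path.append((indent, line.strip()))
--         # 祖先 → 自行の順で結合したパスを記録する
--         hierarchical_paths.append([item[1] for item in current_path])
--     return hierarchical_paths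
-- ===== SOURCE B (Python) =====
-- def calculate_hierarchical_path(config: list[str]) -> list[list[str]]:
--     """Stack-free variant: each line's parent is the nearest previous line with a
--     strictly smaller indent, found by chasing memoized parent pointers; each
--     path extends the parent's already-computed path."""
--     indents = [len(line) - len(line.lstrip()) for line in config]
--     texts = [line.strip() for line in config]
--     parents: list[int] = []
--     paths: list[list[str]] = []
--     for i, ind in enumerate(indents):
--         j = i - 1
--         while j >= 0 and indents[j] >= ind:
--             j = parents[j]
--         parents.append(j)
--         paths.append((paths[j] if j >= 0 else []) + [texts[i]])
--     return paths
-- ===== Notes on version B (the rewrite author's own statement) =====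
-- stated objective: alternative
-- what changed: B removes A's stack of (indent, text) pairs: it precomputes indents and stripped texts, finds each line's parent (the nearest previous line with strictly smaller indent) by chasing memoized parent pointers, and builds each path by extending the parent's already-computed path instead of re-collecting a stack.
import Mathlib
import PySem

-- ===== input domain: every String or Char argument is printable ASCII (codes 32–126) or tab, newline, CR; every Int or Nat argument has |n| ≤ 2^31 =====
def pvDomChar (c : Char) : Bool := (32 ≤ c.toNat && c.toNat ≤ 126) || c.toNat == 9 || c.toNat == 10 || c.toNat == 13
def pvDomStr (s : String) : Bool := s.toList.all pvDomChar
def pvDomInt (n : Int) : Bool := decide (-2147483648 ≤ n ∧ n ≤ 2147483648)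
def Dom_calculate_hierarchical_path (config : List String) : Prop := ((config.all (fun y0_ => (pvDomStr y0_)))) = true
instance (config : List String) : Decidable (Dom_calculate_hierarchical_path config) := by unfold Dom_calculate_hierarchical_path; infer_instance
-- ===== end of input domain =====

-- B drops A's indentation stack: each line's parent is the nearest previous line with a
-- strictly smaller indent, found by chasing memoized parent pointers, and each path
-- extends the parent's stored path (objective: alternative; same results, no stack).

-- indent = len(line) - len(line.lstrip()), shared by both ports
def pvIndent (line : String) : Int :=
  PySem.Str.len line - PySem.Str.len (PySem.Str.lstrip line)

-- ===== PORT A =====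
-- the stack is kept head-first (head = Python's current_path[-1]); the while-pop loop:
def pvPopA (indent : Int) : List (Int × String) → List (Int × String)
  | [] => []
  | (i, t) :: rest => if i ≥ indent then pvPopA indent rest else (i, t) :: rest

def pvLoopA : List String → List (Int × String) → List (List String)
  | [], _ => []
  | line :: rest, stack =>
    let indent := pvIndent line
    let st := (indent, PySem.Str.strip line) :: pvPopA indent stack
    -- [item[1] for item in current_path]  (bottom → top, hence .reverse)
    (st.reverse.map Prod.snd) :: pvLoopA rest st

def calculate_hierarchical_path (config : List String) : List (List String) :=
  pvLoopA config []

-- ===== PORT B =====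
-- 'paths[j] if j >= 0 else []'  (paths[j] is always in range in Source B: j < i = len(paths))
def pvBase (j : Int) (paths : List (List String)) : List String :=
  if 0 ≤ j then paths.getD j.toNat [] else []

-- 'j = i - 1; while j >= 0 and indents[j] >= ind: j = parents[j]'.  The while loop is
-- ported with fuel i+1, which always suffices: every stored parent is smaller than its
-- index, so j strictly decreases and the loop runs at most i+1 times.
def pvJump (indents parents : List Int) (ind : Int) : Int → Nat → Int
  | j, 0 => j
  | j, fuel + 1 =>
    if 0 ≤ j ∧ indents.getD j.toNat 0 ≥ ind then
      pvJump indents parents ind (parents.getD j.toNat 0) fuel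
    else j

-- the 'for i, ind in enumerate(indents)' loop, carrying the parents and paths lists
def pvLoopB (indents : List Int) (texts : List String) (i : Nat)
    (parents : List Int) (paths : List (List String)) : List (List String) :=
  if _h : i < indents.length then
    let ind := indents.getD i 0
    let j := pvJump indents parents ind ((i : Int) - 1) (i + 1)
    pvLoopB indents texts (i + 1) (parents ++ [j])
      (paths ++ [pvBase j paths ++ [texts.getD i ""]])
  else paths
termination_by indents.length - i

def calculate_hierarchical_path_alt (config : List String) : List (List String) :=
  pvLoopB (config.map pvIndent) (config.map PySem.Str.strip) 0 [] []

-- ===== PRECONDITION & SPEC =====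
def Spec_calculate_hierarchical_path (config : List String) (out : List (List String)) : Prop := out = calculate_hierarchical_path_alt config
instance (config : List String) (out : List (List String)) : Decidable (Spec_calculate_hierarchical_path config out) := by unfold Spec_calculate_hierarchical_path; infer_instance

-- ===== CLAIM (what is proved, stated in full; the proofs are below) =====
def Claim_equal_calculate_hierarchical_path : Prop := ∀ (config : List String), Dom_calculate_hierarchical_path config → Spec_calculate_hierarchical_path config (calculate_hierarchical_path config)

-- ===== LEMMAS AND PROOFS =====

-- "r is the nearest index before i whose indent is < ind, or -1 if there is none"
def pvNS (indents : List Int) (ind : Int) (i : Nat) (r : Int) : Prop :=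
  (r = -1 ∧ ∀ q : Nat, q < i → indents.getD q 0 ≥ ind) ∨
  (∃ p : Nat, r = (p : Int) ∧ p < i ∧ indents.getD p 0 < ind ∧
    ∀ q : Nat, p < q → q < i → indents.getD q 0 ≥ ind)

-- Invariant: A's stack sa (head-first) sits at line indices ks (strictly decreasing
-- head-first); each entry's indent is the indent of its line, and the already-recorded
-- output at its index is the bottom→top text list of the stack from that entry down.
inductive pvInvK (indents : List Int) (result : List (List String)) :
    List (Int × String) → List Nat → Prop
  | nil : pvInvK indents result [] []
  | cons (ind : Int) (t : String) (k : Nat) (sa : List (Int × String)) (ks : List Nat)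
      (hind : indents.getD k 0 = ind)
      (hres : result.getD k [] = (((ind, t) :: sa).reverse.map Prod.snd))
      (hlt : ∀ k' ∈ ks, k' < k)
      (h : pvInvK indents result sa ks) :
      pvInvK indents result ((ind, t) :: sa) (k :: ks)

-- the jump loop computes the nearest smaller indent, given that every already-stored
-- parent pointer is itself correct
theorem pvJump_spec (indents parents : List Int) (ind : Int) (i : Nat)
    (hpar : ∀ j' : Nat, j' < i →
      pvNS indents (indents.getD j' 0) j' (parents.getD j' 0)) :
    ∀ (fuel : Nat) (j : Int), -1 ≤ j → j < (i : Int) →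
    (∀ q : Nat, j < (q : Int) → q < i → indents.getD q 0 ≥ ind) →
    j + 1 < (fuel : Int) →
    pvNS indents ind i (pvJump indents parents ind j fuel) := by
  intro fuel
  induction fuel with
  | zero => intro j h1 _ _ hf; simp at hf; omega
  | succ fuel ih =>
    intro j h1 h2 hint hf
    simp only [pvJump]
    by_cases hc : 0 ≤ j ∧ indents.getD j.toNat 0 ≥ ind
    · rw [if_pos hc]
      obtain ⟨hj0, hjind⟩ := hc
      have hjn : ((j.toNat : Nat) : Int) = j := Int.toNat_of_nonneg hj0
      have hji : j.toNat < i := by omega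
      have hspec := hpar j.toNat hji
      rcases hspec with ⟨hr, hall⟩ | ⟨p, hrp, hpl, hpind, hbet⟩
      · rw [hr]
        refine ih (-1) (by omega) (by omega) ?_ (by push_cast; omega)
        intro q hq1 hq2
        rcases Nat.lt_trichotomy q j.toNat with h' | h' | h'
        · have := hall q h'; omega
        · subst h'; exact hjind
        · exact hint q (by omega) hq2
      · rw [hrp]
        refine ih (p : Int) (by omega) (by omega) ?_ (by omega)
        intro q hq1 hq2
        rcases Nat.lt_trichotomy q j.toNat with h' | h' | h'
        · rcases Nat.lt_or_ge p q with h'' | h''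
          · have := hbet q h'' h'; omega
          · omega
        · subst h'; exact hjind
        · exact hint q (by omega) hq2
    · rw [if_neg hc]
      push Not at hc
      rcases lt_or_ge j 0 with hneg | hpos
      · left
        refine ⟨by omega, ?_⟩
        intro q hq
        exact hint q (by omega) hq
      · right
        refine ⟨j.toNat, (Int.toNat_of_nonneg hpos).symm, by omega, hc hpos, ?_⟩
        intro q hq1 hq2
        exact hint q (by omega) hq2

theorem pvPop_all (indents : List Int) (result : List (List String)) (ind : Int)
    (sa : List (Int × String)) (ks : List Nat) (h : pvInvK indents result sa ks)
    (hall : ∀ k ∈ ks, indents.getD k 0 ≥ ind) : pvPopA ind sa = [] := by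
  induction h with
  | nil => rfl
  | cons ind0 t0 k0 sa ks hind hres hlt h ih =>
    have : ind0 ≥ ind := hind ▸ hall k0 (by simp)
    simp only [pvPopA, if_pos this]
    exact ih fun k hk => hall k (by simp [hk])

theorem pvPop_at (indents : List Int) (result : List (List String)) (ind : Int) (p : Nat) :
    ∀ (sa : List (Int × String)) (ks : List Nat), pvInvK indents result sa ks →
    p ∈ ks → indents.getD p 0 < ind →
    (∀ q ∈ ks, p < q → indents.getD q 0 ≥ ind) →
    ∃ sa' ks', pvPopA ind sa = sa' ∧ pvInvK indents result sa' (p :: ks') ∧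
      result.getD p [] = sa'.reverse.map Prod.snd ∧
      (∀ k ∈ p :: ks', k ≤ p) ∧ (∀ k ∈ ks, k ∉ p :: ks' → p < k) := by
  intro sa ks h
  induction h with
  | nil => intro hmem; simp at hmem
  | cons ind0 t0 k0 sa ks hind hres hlt h ih =>
    intro hmem hplt hscan
    by_cases hk : k0 = p
    · subst hk
      have hnot : ¬ (ind0 ≥ ind) := by rw [← hind]; omega
      refine ⟨(ind0, t0) :: sa, ks, ?_, ?_, ?_, ?_, ?_⟩
      · simp only [pvPopA, if_neg hnot]
      · exact pvInvK.cons ind0 t0 k0 sa ks hind hres hlt h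
      · exact hres
      · intro k hk
        rcases List.mem_cons.mp hk with h' | h'
        · omega
        · exact Nat.le_of_lt (hlt k h')
      · intro k hk1 hk2; exact absurd hk1 hk2
    · have hp : p ∈ ks := by
        rcases List.mem_cons.mp hmem with h' | h'
        · exact absurd h'.symm hk
        · exact h'
      have hk0p : p < k0 := hlt p hp
      have hpop : ind0 ≥ ind := by
        have := hscan k0 (by simp) hk0p
        omega
      obtain ⟨sa', ks', h1, h2, h3, h4, h5⟩ :=
        ih hp hplt (fun q hq hpq => hscan q (by simp [hq]) hpq)
      refine ⟨sa', ks', ?_, h2, h3, h4, ?_⟩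
      · simp only [pvPopA, if_pos hpop]; exact h1
      · intro k hk1 hk2
        rcases List.mem_cons.mp hk1 with h' | h'
        · omega
        · exact h5 k h' hk2

theorem pvInvK_append (indents : List Int) (result : List (List String))
    (x : List String) (sa : List (Int × String)) (ks : List Nat)
    (h : pvInvK indents result sa ks) (hlen : ∀ k ∈ ks, k < result.length) :
    pvInvK indents (result ++ [x]) sa ks := by
  induction h with
  | nil => exact pvInvK.nil
  | cons ind0 t0 k0 sa ks hind hres hlt h ih =>
    refine pvInvK.cons ind0 t0 k0 sa ks hind ?_ hlt (ih fun k hk => hlen k (by simp [hk]))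
    rw [← hres]
    have hk0 : k0 < result.length := hlen k0 (by simp)
    simp [List.getD, List.getElem?_append_left hk0]

theorem pvGetD_append_self {α : Type} (l : List α) (x d : α) :
    (l ++ [x]).getD l.length d = x := by
  simp [List.getD]

theorem pvGetD_append_left {α : Type} (l : List α) (x d : α) (k : Nat)
    (hk : k < l.length) : (l ++ [x]).getD k d = l.getD k d := by
  simp [List.getD, List.getElem?_append_left hk]

theorem pvGetD_map_indent (config : List String) (i : Nat) (hi : i < config.length) :
    (config.map pvIndent).getD i 0 = pvIndent config[i] := by
  simp [List.getD, List.getElem?_map, List.getElem?_eq_getElem hi]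

theorem pvGetD_map_strip (config : List String) (i : Nat) (hi : i < config.length) :
    (config.map PySem.Str.strip).getD i "" = PySem.Str.strip config[i] := by
  simp [List.getD, List.getElem?_map, List.getElem?_eq_getElem hi]

theorem pvMain (config : List String) :
    ∀ (n i : Nat) (sa : List (Int × String)) (ks : List Nat)
      (parents : List Int) (result : List (List String)),
    n = config.length - i →
    pvInvK (config.map pvIndent) result sa ks →
    (∀ k ∈ ks, k < i) →
    result.length = i →
    parents.length = i →
    (∀ j' : Nat, j' < i →
      pvNS (config.map pvIndent) ((config.map pvIndent).getD j' 0) j' (parents.getD j' 0)) →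
    (∀ p, p < i → p ∉ ks →
      ∃ q, p < q ∧ q < i ∧
        (config.map pvIndent).getD q 0 ≤ (config.map pvIndent).getD p 0) →
    pvLoopB (config.map pvIndent) (config.map PySem.Str.strip) i parents result =
      result ++ pvLoopA (config.drop i) sa := by
  intro n
  induction n with
  | zero =>
    intro i sa ks parents result hn _ _ _ _ _ _
    have hi : ¬ i < (config.map pvIndent).length := by simp; omega
    rw [pvLoopB, dif_neg hi]
    have : config.drop i = [] := List.drop_eq_nil_of_le (by omega)
    simp [this, pvLoopA]
  | succ n ihn =>
    intro i sa ks parents result hn hinv hks hlen hplen hpar hwit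
    by_cases hi : i < config.length
    · have hi' : i < (config.map pvIndent).length := by simpa
      rw [pvLoopB, dif_pos hi']
      have hdrop : config.drop i = config[i] :: config.drop (i + 1) :=
        List.drop_eq_getElem_cons hi
      rw [hdrop]
      simp only [pvLoopA]
      rw [pvGetD_map_indent config i hi, pvGetD_map_strip config i hi]
      set ind := pvIndent config[i] with hind
      set text := PySem.Str.strip config[i] with htext
      set r := pvJump (config.map pvIndent) parents ind ((i : Int) - 1) (i + 1) with hr
      have hns : pvNS (config.map pvIndent) ind i r := by
        rw [hr]
        refine pvJump_spec (config.map pvIndent) parents ind i hpar (i + 1)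
          ((i : Int) - 1) (by omega) (by omega) ?_ (by push_cast; omega)
        intro q hq1 hq2
        omega
      -- correctness of the new parents entry, stated with getD i 0
      have hnsi : pvNS (config.map pvIndent) ((config.map pvIndent).getD i 0) i r := by
        rw [pvGetD_map_indent config i hi]; exact hns
      have hparnew : ∀ j' : Nat, j' < i + 1 →
          pvNS (config.map pvIndent) ((config.map pvIndent).getD j' 0) j'
            ((parents ++ [r]).getD j' 0) := by
        intro j' hj'
        rcases Nat.lt_succ_iff_lt_or_eq.mp hj' with h' | h'
        · rw [pvGetD_append_left parents r 0 j' (by omega)]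
          exact hpar j' h'
        · have hg : (parents ++ [r]).getD j' 0 = r := by
            rw [h', ← hplen]; exact pvGetD_append_self parents r 0
          rw [hg, h']
          exact hnsi
      rcases hns with ⟨hr1, hall'⟩ | ⟨p, hrp, hpl, hpind, hbet⟩
      · -- no parent: A's whole stack is popped, B starts a fresh path
        have hall : ∀ k ∈ ks, (config.map pvIndent).getD k 0 ≥ ind :=
          fun k hk => hall' k (hks k hk)
        have hpop : pvPopA ind sa = [] := pvPop_all _ result ind sa ks hinv hall
        rw [hpop, hr1]
        rw [show pvBase (-1) result = [] from rfl]
        have hnewinv : pvInvK (config.map pvIndent) (result ++ [[text]])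
            [(ind, text)] [i] := by
          refine pvInvK.cons ind text i [] [] ?_ ?_ (by simp) pvInvK.nil
          · exact pvGetD_map_indent config i hi
          · rw [← hlen]; rw [pvGetD_append_self]; simp
        have := ihn (i + 1) [(ind, text)] [i] (parents ++ [-1]) (result ++ [[text]])
          (by omega) hnewinv (by simp) (by simp [hlen]) (by simp [hplen])
          (by rw [← hr1]; exact hparnew)
          (by
            intro p hp hpn
            have hpi : p < i := by
              rcases Nat.lt_succ_iff_lt_or_eq.mp hp with h' | h'
              · exact h'
              · exact absurd (h' ▸ List.mem_singleton_self i) (h' ▸ hpn)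
            by_cases hpk : p ∈ ks
            · exact ⟨i, hpi, by omega, by
                have := hall p hpk
                rw [pvGetD_map_indent config i hi, ← hind]; omega⟩
            · obtain ⟨q, h1, h2, h3⟩ := hwit p hpi hpk
              exact ⟨q, h1, by omega, h3⟩)
        rw [List.nil_append, this]
        simp
      · -- parent p: A pops down to the entry at index p, B extends the path stored at p
        have hjks : p ∈ ks := by
          by_contra hjn
          obtain ⟨q, h1, h2, h3⟩ := hwit p hpl hjn
          have := hbet q h1 h2
          omega
        obtain ⟨sa', ks', hpop, hinv', hres', hle', hout'⟩ :=
          pvPop_at (config.map pvIndent) result ind p sa ks hinv hjks hpind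
            (fun q hq hpq => hbet q hpq (hks q hq))
        rw [hpop, hrp]
        rw [show pvBase ((p : Nat) : Int) result = result.getD p [] by
          simp [pvBase]]
        have hnewinv : pvInvK (config.map pvIndent)
            (result ++ [result.getD p [] ++ [text]]) ((ind, text) :: sa')
            (i :: p :: ks') := by
          refine pvInvK.cons ind text i sa' (p :: ks') ?_ ?_ ?_ ?_
          · exact pvGetD_map_indent config i hi
          · rw [← hlen, pvGetD_append_self, hres']
            simp
          · intro k hk
            have := hle' k hk
            omega
          · exact pvInvK_append _ result _ sa' (p :: ks') hinv'
              (fun k hk => by have := hle' k hk; omega)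
        have := ihn (i + 1) ((ind, text) :: sa') (i :: p :: ks')
          (parents ++ [(p : Int)]) (result ++ [result.getD p [] ++ [text]])
          (by omega) hnewinv
          (by
            intro k hk
            rcases List.mem_cons.mp hk with h' | h'
            · omega
            · have := hle' k h'; omega)
          (by simp [hlen]) (by simp [hplen])
          (by rw [← hrp]; exact hparnew)
          (by
            intro p' hp' hpn
            have hpi : p' < i := by
              rcases Nat.lt_succ_iff_lt_or_eq.mp hp' with h' | h'
              · exact h'
              · exact absurd (by simp [h']) hpn
            have hpn' : p' ∉ p :: ks' := fun hc => hpn (by simp [hc])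
            by_cases hpk : p' ∈ ks
            · have hjp : p < p' := hout' p' hpk hpn'
              have := hbet p' hjp hpi
              exact ⟨i, hpi, by omega,
                by rw [pvGetD_map_indent config i hi, ← hind]; omega⟩
            · obtain ⟨q, h1, h2, h3⟩ := hwit p' hpi hpk
              exact ⟨q, h1, by omega, h3⟩)
        rw [this, hres']
        simp
    · have hi' : ¬ i < (config.map pvIndent).length := by simpa using hi
      rw [pvLoopB, dif_neg hi']
      have : config.drop i = [] := List.drop_eq_nil_of_le (by omega)
      simp [this, pvLoopA]

-- ===== VERDICT (by name: the statement is the Claim_ definition above) =====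
theorem calculate_hierarchical_path_spec : Claim_equal_calculate_hierarchical_path := by
  intro config _
  unfold Spec_calculate_hierarchical_path calculate_hierarchical_path calculate_hierarchical_path_alt
  have := pvMain config config.length 0 [] [] [] [] (by simp) pvInvK.nil
    (by simp) rfl rfl (by intro j' hj'; omega) (by intro p hp; omega)
  simp at this
  exact this.symm
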